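-- pv_equiv track=rewrite | github.com/mehdidc/image2vec | image2vec.py | build_pipeline_params
-- ===== SOURCE A (Python) =====
-- def is_sequence(arg):
--     return (not hasattr(arg, "strip") and
--             hasattr(arg, "__getitem__") or
--             hasattr(arg, "__iter__"))
--
-- def build_pipeline_params(all_params):
--     min_len = min(len(p) for p in all_params if p is not None)
--     all_params_cleaned = []
--     for p in all_params:
--         if p is None:
--             p = [[]] * min_len
--         else:
--             p = [ap if is_sequence(ap) else [ap] for ap in p]
--         all_params_cleaned.append(p)
--     all_params_cleaned =  [ap for ap in zip(*all_params_cleaned)]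
--     all_params_cleaned = [ [ap] for ap in all_params_cleaned]
--     return all_params_cleaned
-- ===== SOURCE B (Python) =====
-- def is_sequence(arg):
--     return (not hasattr(arg, "strip") and
--             hasattr(arg, "__getitem__") or
--             hasattr(arg, "__iter__"))
--
-- def build_pipeline_params(all_params):
--     # column-major: walk indices 0..min_len-1 once, normalizing each element on the fly
--     lens = [len(p) for p in all_params if p is not None]
--     min_len = min(lens) if lens else 0
--     rows = []
--     for i in range(min_len):
--         row = tuple([] if p is None else
--                     (p[i] if is_sequence(p[i]) else [p[i]])
--                     for p in all_params)
--         rows.append([row])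
--     return rows
-- ===== Notes on version B (the rewrite author's own statement) =====
-- stated objective: alternative
-- what changed: B replaces A's normalize-every-row-then-zip(*)-then-wrap three-pass pipeline by a single column-major index loop over range(min_len) that builds each output row directly, normalizing elements on the fly, without materializing the intermediate cleaned lists.
import Mathlib
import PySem

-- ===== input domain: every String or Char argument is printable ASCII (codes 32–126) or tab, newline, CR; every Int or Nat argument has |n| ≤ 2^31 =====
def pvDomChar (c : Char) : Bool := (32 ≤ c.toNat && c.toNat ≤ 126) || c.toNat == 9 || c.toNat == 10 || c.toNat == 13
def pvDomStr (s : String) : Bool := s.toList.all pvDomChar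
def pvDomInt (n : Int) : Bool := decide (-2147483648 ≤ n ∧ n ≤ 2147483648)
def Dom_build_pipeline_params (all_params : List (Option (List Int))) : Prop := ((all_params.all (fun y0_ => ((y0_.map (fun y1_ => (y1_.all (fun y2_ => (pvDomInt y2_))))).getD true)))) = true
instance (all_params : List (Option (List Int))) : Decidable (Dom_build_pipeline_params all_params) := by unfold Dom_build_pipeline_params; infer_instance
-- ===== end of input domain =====

-- B builds the result column-major in one index loop over range(min_len), normalizing
-- elements on the fly, instead of A's normalize-all-rows / zip(*) / wrap three-pass pipeline.

-- ===== PORT A =====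

-- heads of all lists (Python zip's per-step head extraction); none when some list is exhausted
def pvHeads {α : Type} : List (List α) → Option (List α)
  | [] => some []
  | [] :: _ => none
  | (x :: _) :: rest => (pvHeads rest).map (fun hs => x :: hs)

-- zip(*ls): structural recursion on the first list, stepping the rest in lockstep
def pyZipAux {α : Type} : List α → List (List α) → List (List α)
  | [], _ => []
  | x :: l, rest =>
    match pvHeads rest with
    | none => []
    | some hs => (x :: hs) :: pyZipAux l (rest.map (fun r => r.drop 1))

def pyZipN {α : Type} : List (List α) → List (List α)
  | [] => []
  | l :: rest => pyZipAux l rest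

def build_pipeline_params (all_params : List (Option (List Int))) : List (List (List (List Int))) :=
  -- min(len(p) for p in all_params if p is not None); Python raises ValueError when the
  -- generator is empty — that case is excluded by Pre_ (the [] result is unreachable there)
  match ((all_params.filterMap id).map List.length).min? with
  | none => []
  | some min_len =>
    let all_params_cleaned := all_params.map (fun p =>
      match p with
      | none => List.replicate min_len ([] : List Int)    -- [[]] * min_len
      | some q => q.map (fun ap => [ap]))                 -- is_sequence(int) is False: wrap each
    (pyZipN all_params_cleaned).map (fun ap => [ap])

-- ===== PORT B =====
def build_pipeline_params_alt (all_params : List (Option (List Int))) : List (List (List (List Int))) :=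
  let lens := all_params.filterMap (fun p => p.map List.length)
  let min_len := match lens.min? with | some m => m | none => 0
  (List.range min_len).map (fun i =>
    [all_params.map (fun p =>
      match p with
      | none => ([] : List Int)
      | some q => [q.getD i 0])])   -- p[i]; i < min_len ≤ len q, so the default 0 is unreachable

-- ===== PRECONDITION & SPEC =====
-- Pre_ excludes exactly the inputs with no non-None parameter list, on which A's min() raises ValueError.
def Pre_build_pipeline_params (all_params : List (Option (List Int))) : Prop :=
  ∃ p ∈ all_params, p.isSome
instance (all_params : List (Option (List Int))) : Decidable (Pre_build_pipeline_params all_params) := by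
  unfold Pre_build_pipeline_params; infer_instance

def pvWitness_build_pipeline_params : List (Option (List Int)) := [some [1, 2], none, some [3]]

def Spec_build_pipeline_params (all_params : List (Option (List Int))) (out : List (List (List (List Int)))) : Prop := out = build_pipeline_params_alt all_params
instance (all_params : List (Option (List Int))) (out : List (List (List (List Int)))) : Decidable (Spec_build_pipeline_params all_params out) := by unfold Spec_build_pipeline_params; infer_instance

-- ===== CLAIM (what is proved, stated in full; the proofs are below) =====
def Claim_equal_build_pipeline_params : Prop := ∀ (all_params : List (Option (List Int))), Dom_build_pipeline_params all_params → Pre_build_pipeline_params all_params → Spec_build_pipeline_params all_params (build_pipeline_params all_params)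

-- ===== LEMMAS AND PROOFS =====

lemma pvHeads_none {α : Type} (rest : List (List α)) (h : [] ∈ rest) : pvHeads rest = none := by
  induction rest with
  | nil => cases h
  | cons r rs ih =>
    cases r with
    | nil => rfl
    | cons x t =>
      simp only [List.mem_cons] at h
      rcases h with h | h
      · cases h
      · simp [pvHeads, ih h]

lemma pvHeads_some {α : Type} (d : α) (rest : List (List α)) (h : ∀ l ∈ rest, l ≠ []) :
    pvHeads rest = some (rest.map (fun l => l.getD 0 d)) := by
  induction rest with
  | nil => rfl
  | cons r rs ih =>
    cases r with
    | nil => exact absurd rfl (h [] (by simp))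
    | cons x t =>
      simp only [pvHeads, ih (fun l hl => h l (by simp [hl]))]
      simp

lemma zip_eq {α : Type} (d : α) :
    ∀ (n : Nat) (fst : List α) (rest : List (List α)),
      (∀ l ∈ fst :: rest, n ≤ l.length) → (∃ l ∈ fst :: rest, l.length = n) →
      pyZipAux fst rest = (List.range n).map (fun i => (fst :: rest).map (fun l => l.getD i d)) := by
  intro n
  induction n with
  | zero =>
    intro fst rest _ hex
    obtain ⟨l, hl, hlen⟩ := hex
    have hnil : l = [] := List.eq_nil_of_length_eq_zero hlen
    subst hnil
    simp only [List.range_zero, List.map_nil]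
    rcases List.mem_cons.mp hl with h | h
    · subst h; rfl
    · cases fst with
      | nil => rfl
      | cons x t => simp [pyZipAux, pvHeads_none rest h]
  | succ n ih =>
    intro fst rest hle hex
    rcases fst with _ | ⟨x, t⟩
    · have h0 := hle [] (by simp)
      simp at h0
    · have hrne : ∀ l ∈ rest, l ≠ [] := by
        intro l hl hnil
        have h1 := hle l (by simp [hl])
        rw [hnil] at h1
        simp at h1
      have hstep : pyZipAux (x :: t) rest =
          (x :: rest.map (fun l => l.getD 0 d)) ::
            pyZipAux t (rest.map (fun r => r.drop 1)) := by
        simp [pyZipAux, pvHeads_some d rest hrne]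
      rw [hstep]
      have hle2 : ∀ l ∈ t :: rest.map (fun r => r.drop 1), n ≤ l.length := by
        intro l hl
        rcases List.mem_cons.mp hl with h | h
        · have h2 := hle (x :: t) (by simp)
          rw [h]
          simp at h2
          omega
        · obtain ⟨r, hr, hrl⟩ := List.mem_map.mp h
          have h3 := hle r (by simp [hr])
          rw [← hrl]
          simp only [List.length_drop]
          omega
      have hex2 : ∃ l ∈ t :: rest.map (fun r => r.drop 1), l.length = n := by
        obtain ⟨w, hw, hlenw⟩ := hex
        rcases List.mem_cons.mp hw with h | h
        · refine ⟨t, by simp, ?_⟩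
          have h4 := congrArg List.length h
          simp only [List.length_cons] at h4
          omega
        · refine ⟨w.drop 1, List.mem_cons_of_mem _ (List.mem_map.mpr ⟨w, h, rfl⟩), ?_⟩
          simp [hlenw]
      rw [ih t (rest.map (fun r => r.drop 1)) hle2 hex2]
      rw [List.range_succ_eq_map]
      simp only [List.map_cons, List.map_map]
      congr 1
      apply List.map_congr_left
      intro i _
      simp only [Function.comp_apply]
      congr 1
      apply List.map_congr_left
      intro r hr
      rcases r with _ | ⟨y, rtl⟩
      · exact absurd rfl (hrne [] hr)
      · simp

lemma getD_replicate_self {α : Type} (n i : Nat) (a : α) :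
    (List.replicate n a).getD i a = a := by
  induction n generalizing i with
  | zero => cases i <;> rfl
  | succ m ih => cases i with
    | zero => rfl
    | succ j => simpa [List.replicate] using ih j

-- ===== VERDICT (by name: the statement is the Claim_ definition above) =====
theorem build_pipeline_params_spec : Claim_equal_build_pipeline_params := by
  intro all_params _ hpre
  unfold Spec_build_pipeline_params build_pipeline_params build_pipeline_params_alt
  have hlens : all_params.filterMap (fun p => p.map List.length)
      = (all_params.filterMap id).map List.length := by
    rw [List.map_filterMap]; rfl
  rw [hlens]
  obtain ⟨p0, hp0, hs0⟩ := hpre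
  obtain ⟨q0, rfl⟩ := Option.isSome_iff_exists.mp hs0
  set lens := (all_params.filterMap id).map List.length with hlensdef
  have hmem0 : q0.length ∈ lens := by
    apply List.mem_map.mpr
    exact ⟨q0, List.mem_filterMap.mpr ⟨some q0, hp0, rfl⟩, rfl⟩
  have hne : lens ≠ [] := List.ne_nil_of_mem hmem0
  obtain ⟨n, hmin⟩ := Option.isSome_iff_exists.mp (List.isSome_min?_of_ne_nil hne)
  have hmin' := List.min?_eq_some_iff.mp hmin
  obtain ⟨hnmem, hnle⟩ := hmin'
  rw [hmin]
  dsimp only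
  -- characterize the lengths in the cleaned list
  set cleaned := all_params.map (fun p =>
      match p with
      | none => List.replicate n ([] : List Int)
      | some q => q.map (fun ap => [ap])) with hcleandef
  have hle : ∀ l ∈ cleaned, n ≤ l.length := by
    intro l hl
    obtain ⟨p, hp, rfl⟩ := List.mem_map.mp hl
    cases p with
    | none => simp
    | some q =>
      simp only [List.length_map]
      exact hnle _ (List.mem_map.mpr ⟨q, List.mem_filterMap.mpr ⟨some q, hp, rfl⟩, rfl⟩)
  have hex : ∃ l ∈ cleaned, l.length = n := by
    obtain ⟨q, hq, hql⟩ := List.mem_map.mp hnmem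
    obtain ⟨op, hop, hopeq⟩ := List.mem_filterMap.mp hq
    cases op with
    | none => cases hopeq
    | some q2 =>
      refine ⟨q2.map (fun ap => [ap]), List.mem_map.mpr ⟨some q2, hop, rfl⟩, ?_⟩
      have hq2 : q2 = q := by simp at hopeq; exact hopeq
      rw [hq2]
      simp [hql]
  have hclne : cleaned ≠ [] := by
    have : (some q0 : Option (List Int)) ∈ all_params := hp0
    intro h
    rcases all_params with _ | ⟨a, as⟩
    · cases this
    · simp [hcleandef] at h
  obtain ⟨c, crest, hcons⟩ := List.exists_cons_of_ne_nil hclne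
  have hz : pyZipN cleaned =
      (List.range n).map (fun i => cleaned.map (fun l => l.getD i ([] : List Int))) := by
    rw [hcons, pyZipN]
    rw [zip_eq ([] : List Int) n c crest (hcons ▸ hle) (hcons ▸ hex)]
  rw [hz, List.map_map]
  simp only [hmin]
  apply List.map_congr_left
  intro i hi
  have hilt : i < n := List.mem_range.mp hi
  simp only [Function.comp_apply]
  rw [hcleandef, List.map_map]
  refine congrArg (fun z => [z]) ?_
  apply List.map_congr_left
  intro p hp
  cases p with
  | none => simpa using getD_replicate_self n i ([] : List Int)
  | some q =>
    have hlen : i < q.length :=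
      Nat.lt_of_lt_of_le hilt
        (hnle _ (List.mem_map.mpr ⟨q, List.mem_filterMap.mpr ⟨some q, hp, rfl⟩, rfl⟩))
    simp [List.getD_eq_getElem?_getD, List.getElem?_eq_getElem hlen]
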